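-- pv_equiv track=rewrite | github.com/sooieese00/MobileReceiptAnalyzer | naver_07.py | group_cycles
-- ===== SOURCE A (Python) =====
-- def group_cycles(sorted_cycles, max_diff=7):
--     groups = []
--     group = []
--
--     for i in range(len(sorted_cycles)):
--         if sorted_cycles[i][1] == 0:
--             continue
--         if not group or sorted_cycles[i][1] - group[0][1] <= max_diff:
--             group.append(sorted_cycles[i])
--         else:
--             groups.append(group)
--             group = [sorted_cycles[i]]
--
--     if group:
--         groups.append(group)
--
--     # 그룹 내에서 가장 큰 값과 가장 작은 값의 차이가 7 이하인지 확인
--     final_groups = []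
--     for group in groups:
--         if max(group, key=lambda x: x[1])[1] - min(group, key=lambda x: x[1])[1] <= max_diff:
--             final_groups.append(group)
--
--     return final_groups
-- ===== SOURCE B (Python) =====
-- def group_cycles(sorted_cycles, max_diff=7):
--     # Single fused pass: build each group while tracking its seed value and the
--     # running min/max of its values; emit a finished group only if max-min <= max_diff.
--     final_groups = []
--     group = []
--     seed = lo = hi = 0
--     for item in sorted_cycles:
--         v = item[1]
--         if v == 0:
--             continue
--         if not group:
--             group = [item]
--             seed = lo = hi = v
--         elif v - seed <= max_diff:
--             group.append(item)
--             if v < lo: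
--                 lo = v
--             if v > hi:
--                 hi = v
--         else:
--             if hi - lo <= max_diff:
--                 final_groups.append(group)
--             group = [item]
--             seed = lo = hi = v
--     if group and hi - lo <= max_diff:
--         final_groups.append(group)
--     return final_groups
-- ===== Notes on version B (the rewrite author's own statement) =====
-- stated objective: alternative
-- what changed: Fused the two passes into one: instead of first building all groups and then re-scanning each group with max()/min() to filter, B maintains a running min and max of the current group's values and decides emission at each group boundary (and at the final flush).
import Mathlib
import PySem

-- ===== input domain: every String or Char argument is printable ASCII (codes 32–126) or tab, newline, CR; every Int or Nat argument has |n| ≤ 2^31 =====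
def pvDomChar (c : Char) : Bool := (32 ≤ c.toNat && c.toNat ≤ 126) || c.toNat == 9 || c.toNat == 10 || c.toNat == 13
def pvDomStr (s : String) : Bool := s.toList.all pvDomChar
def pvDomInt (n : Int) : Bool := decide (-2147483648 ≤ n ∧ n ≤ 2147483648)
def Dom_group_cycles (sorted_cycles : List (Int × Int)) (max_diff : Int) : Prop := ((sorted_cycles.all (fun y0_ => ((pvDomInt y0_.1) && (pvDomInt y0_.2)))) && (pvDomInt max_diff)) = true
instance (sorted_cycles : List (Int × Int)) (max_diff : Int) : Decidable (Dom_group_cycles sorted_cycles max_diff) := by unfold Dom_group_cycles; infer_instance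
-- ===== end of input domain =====

-- B changes: one fused pass with a running min/max instead of build-all-groups then re-scan each group with max()/min() (objective: alternative).

-- ===== PORT A =====
-- one step of A's building loop (body of 'for i in range(len(sorted_cycles))');
-- 'group[0][1]' is ported as (st.2.headD (0,0)).2 — it is only reached with group nonempty
def stepA (max_diff : Int) (st : List (List (Int × Int)) × List (Int × Int)) (x : Int × Int) :
    List (List (Int × Int)) × List (Int × Int) :=
  if x.2 == 0 then st
  else if st.2 = [] ∨ x.2 - (st.2.headD (0,0)).2 ≤ max_diff then (st.1, st.2 ++ [x])
  else (st.1 ++ [st.2], [x])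

-- max(group, key=...)[1] / min(group, key=...)[1]; group is always nonempty in the
-- filter loop, so max?/min? are 'some' and the .getD default is never used
def vmax (g : List (Int × Int)) : Int := ((PySem.List.max? g (fun x => x.2)).getD (0, 0)).2
def vmin (g : List (Int × Int)) : Int := ((PySem.List.min? g (fun x => x.2)).getD (0, 0)).2

def group_cycles (sorted_cycles : List (Int × Int)) (max_diff : Int) : List (List (Int × Int)) :=
  -- first loop: for i in range(len(sorted_cycles)); indices are always in range, pyGetD default unused
  let st := (PySem.List.pyRange 0 (PySem.List.len sorted_cycles) 1).foldl
    (fun st i => stepA max_diff st (PySem.List.pyGetD sorted_cycles i (0, 0))) ([], [])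
  let groups := if st.2 = [] then st.1 else st.1 ++ [st.2]
  -- second loop: filter the groups by max-min
  groups.foldl (fun fg g => if vmax g - vmin g ≤ max_diff then fg ++ [g] else fg) []

-- ===== PORT B =====
-- B's single fused loop: current group, its seed value, running lo/hi of its values;
-- a finished group is emitted only if hi - lo ≤ max_diff; flush after the loop
def altLoop (max_diff : Int) (fin : List (List (Int × Int))) (grp : List (Int × Int))
    (seed lo hi : Int) : List (Int × Int) → List (List (Int × Int))
  | [] => if grp ≠ [] ∧ hi - lo ≤ max_diff then fin ++ [grp] else fin
  | x :: rest =>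
    if x.2 == 0 then altLoop max_diff fin grp seed lo hi rest
    else if grp = [] then altLoop max_diff fin [x] x.2 x.2 x.2 rest
    else if x.2 - seed ≤ max_diff then
      altLoop max_diff fin (grp ++ [x]) seed (min lo x.2) (max hi x.2) rest
    else altLoop max_diff (if hi - lo ≤ max_diff then fin ++ [grp] else fin) [x] x.2 x.2 x.2 rest

def group_cycles_alt (sorted_cycles : List (Int × Int)) (max_diff : Int) : List (List (Int × Int)) :=
  altLoop max_diff [] [] 0 0 0 sorted_cycles

-- ===== PRECONDITION & SPEC =====
def Spec_group_cycles (sorted_cycles : List (Int × Int)) (max_diff : Int) (out : List (List (Int × Int))) : Prop := out = group_cycles_alt sorted_cycles max_diff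
instance (sorted_cycles : List (Int × Int)) (max_diff : Int) (out : List (List (Int × Int))) : Decidable (Spec_group_cycles sorted_cycles max_diff out) := by unfold Spec_group_cycles; infer_instance

-- ===== CLAIM (what is proved, stated in full; the proofs are below) =====
def Claim_equal_group_cycles : Prop := ∀ (sorted_cycles : List (Int × Int)) (max_diff : Int), Dom_group_cycles sorted_cycles max_diff → Spec_group_cycles sorted_cycles max_diff (group_cycles sorted_cycles max_diff)

-- ===== LEMMAS AND PROOFS =====

-- A's second loop is a filter
def keepP (max_diff : Int) (g : List (Int × Int)) : Bool := decide (vmax g - vmin g ≤ max_diff)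

lemma emit_acc (max_diff : Int) (gs : List (List (Int × Int))) :
    ∀ acc, gs.foldl (fun fg g => if vmax g - vmin g ≤ max_diff then fg ++ [g] else fg) acc
      = acc ++ gs.filter (keepP max_diff) := by
  induction gs with
  | nil => simp
  | cons g t ih =>
    intro acc
    simp only [List.foldl, List.filter_cons]
    by_cases h : vmax g - vmin g ≤ max_diff
    · rw [if_pos h, ih, show keepP max_diff g = true from by simp [keepP, h]]
      simp
    · rw [if_neg h, ih, show keepP max_diff g = false from by simp [keepP, h]]
      simp

lemma emit_eq_filter (max_diff : Int) (gs : List (List (Int × Int))) :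
    gs.foldl (fun fg g => if vmax g - vmin g ≤ max_diff then fg ++ [g] else fg) []
      = gs.filter (keepP max_diff) := by
  simpa using emit_acc max_diff gs []

lemma vmax_singleton (x : Int × Int) : vmax [x] = x.2 := by
  simp [vmax, PySem.List.max?]

lemma vmin_singleton (x : Int × Int) : vmin [x] = x.2 := by
  simp [vmin, PySem.List.min?]

lemma vmax_append (g : List (Int × Int)) (hg : g ≠ []) (x : Int × Int) :
    vmax (g ++ [x]) = max (vmax g) x.2 := by
  obtain ⟨m, hm⟩ : ∃ m, PySem.List.max? g (fun y => y.2) = some m := by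
    cases h : PySem.List.max? g (fun y => y.2) with
    | none => exact absurd ((PySem.List.max?_eq_none_iff _ _).mp h) hg
    | some m => exact ⟨m, rfl⟩
  simp only [vmax, PySem.List.max?, List.foldl_append] at *
  rw [hm]
  simp only [List.foldl]
  split_ifs with h <;> simp <;> omega

lemma vmin_append (g : List (Int × Int)) (hg : g ≠ []) (x : Int × Int) :
    vmin (g ++ [x]) = min (vmin g) x.2 := by
  obtain ⟨m, hm⟩ : ∃ m, PySem.List.min? g (fun y => y.2) = some m := by
    cases h : PySem.List.min? g (fun y => y.2) with
    | none => exact absurd ((PySem.List.min?_eq_none_iff _ _).mp h) hg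
    | some m => exact ⟨m, rfl⟩
  simp only [vmin, PySem.List.min?, List.foldl_append] at *
  rw [hm]
  simp only [List.foldl]
  split_ifs with h <;> simp <;> omega

-- result of A (filter applied to the finalized group list) as a function of A's loop state
def postA (max_diff : Int) (st : List (List (Int × Int)) × List (Int × Int)) : List (List (Int × Int)) :=
  (if st.2 = [] then st.1 else st.1 ++ [st.2]).filter (keepP max_diff)

-- main invariant: B's fused loop computes A's post-processed result
lemma altLoop_eq_postA (max_diff : Int) (xs : List (Int × Int)) :
    ∀ (gs : List (List (Int × Int))) (g : List (Int × Int)) (fin : List (List (Int × Int)))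
      (seed lo hi : Int),
      fin = gs.filter (keepP max_diff) →
      (g ≠ [] → seed = (g.headD (0, 0)).2 ∧ lo = vmin g ∧ hi = vmax g) →
      altLoop max_diff fin g seed lo hi xs = postA max_diff (xs.foldl (stepA max_diff) (gs, g)) := by
  induction xs with
  | nil =>
    intro gs g fin seed lo hi hfin hinv
    by_cases hg : g = []
    · subst hg hfin
      simp [altLoop, postA]
    · obtain ⟨hs, hl, hh⟩ := hinv hg
      subst hfin hl hh
      simp only [altLoop, List.foldl, postA, hg]
      by_cases h : vmax g - vmin g ≤ max_diff
      · simp [hg, h, keepP]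
      · simp [hg, h, keepP]
  | cons x rest ih =>
    intro gs g fin seed lo hi hfin hinv
    simp only [List.foldl]
    by_cases h0 : x.2 = 0
    · have hb : (x.2 == 0) = true := by simpa using h0
      simp only [altLoop, stepA, hb, if_true]
      exact ih gs g fin seed lo hi hfin hinv
    · have hb : (x.2 == 0) = false := by simpa using h0
      simp only [altLoop, stepA, hb, Bool.false_eq_true, if_false]
      by_cases hg : g = []
      · subst hg
        rw [if_pos rfl, if_pos (Or.inl rfl)]
        exact ih gs [x] fin x.2 x.2 x.2 hfin
          (fun _ => ⟨rfl, (vmin_singleton x).symm, (vmax_singleton x).symm⟩)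
      · obtain ⟨hs, hl, hh⟩ := hinv hg
        subst hs hl hh
        rw [if_neg hg]
        by_cases hle : x.2 - (g.headD (0, 0)).2 ≤ max_diff
        · rw [if_pos hle, if_pos (Or.inr hle)]
          refine ih gs (g ++ [x]) fin (g.headD (0,0)).2 (min (vmin g) x.2) (max (vmax g) x.2) hfin ?_
          intro _
          refine ⟨?_, (vmin_append g hg x).symm, (vmax_append g hg x).symm⟩
          cases g with
          | nil => exact absurd rfl hg
          | cons a t => simp
        · have hcond : ¬ (g = [] ∨ x.2 - (g.headD (0,0)).2 ≤ max_diff) := by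
            rintro (h | h)
            · exact hg h
            · exact hle h
          rw [if_neg hle, if_neg hcond]
          refine ih (gs ++ [g]) [x] _ x.2 x.2 x.2 ?_
            (fun _ => ⟨rfl, (vmin_singleton x).symm, (vmax_singleton x).symm⟩)
          rw [List.filter_append, hfin]
          by_cases h : vmax g - vmin g ≤ max_diff
          · rw [if_pos h, show List.filter (keepP max_diff) [g] = [g] from by simp [keepP, h]]
          · rw [if_neg h, show List.filter (keepP max_diff) [g] = [] from by simp [keepP, h]]
            simp

-- ===== VERDICT (by name: the statement is the Claim_ definition above) =====
theorem group_cycles_spec : Claim_equal_group_cycles := by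
  intro xs d _
  show group_cycles xs d = group_cycles_alt xs d
  unfold group_cycles group_cycles_alt
  rw [PySem.List.foldl_pyRange_zero_pyGetD xs (0,0) (stepA d) ([], [])]
  rw [emit_eq_filter]
  exact (altLoop_eq_postA d xs [] [] [] 0 0 0 rfl (fun h => absurd rfl h)).symm
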